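-- pv_equiv track=rewrite | github.com/z3ht/cses | cses_test_runner.py | format_multiline
-- ===== SOURCE A (Python) =====
-- def format_multiline(text, prefix="      "):
--     lines = text.split('\n')
--     if len(lines) == 1:
--         return text
--     result = lines[0]
--     for line in lines[1:]:
--         result += '\n' + prefix + line
--     return result
-- ===== SOURCE B (Python) =====
-- def format_multiline(text, prefix="      "):
--     return text.replace('\n', '\n' + prefix)
-- ===== Notes on version B (the rewrite author's own statement) =====
-- stated objective: idiomatic
-- what changed: Replaced the split/guard/accumulator loop by a single global str.replace substituting each newline with newline-plus-prefix, with no line list and no special single-line case.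
import Mathlib
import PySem

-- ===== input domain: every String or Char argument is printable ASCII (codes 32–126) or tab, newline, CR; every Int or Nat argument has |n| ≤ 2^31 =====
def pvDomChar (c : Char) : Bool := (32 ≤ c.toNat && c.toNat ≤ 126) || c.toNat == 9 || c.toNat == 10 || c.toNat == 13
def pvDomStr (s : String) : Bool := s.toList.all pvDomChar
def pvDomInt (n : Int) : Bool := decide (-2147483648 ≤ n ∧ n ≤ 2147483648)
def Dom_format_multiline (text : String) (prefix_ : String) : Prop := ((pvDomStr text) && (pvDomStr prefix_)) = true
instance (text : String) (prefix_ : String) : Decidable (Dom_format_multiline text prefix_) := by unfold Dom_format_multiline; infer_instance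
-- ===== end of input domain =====

-- B replaces A's split/guard/accumulator loop by one global substitution of '\n' with '\n'+prefix (idiomatic; same cost).

-- ===== PORT A =====
def format_multiline (text : String) (prefix_ : String) : String :=
  let lines := (PySem.Str.split? text "\n").getD []
  if lines.length = 1 then text
  else
    let result := lines.headD ""          -- lines[0]; split never returns an empty list
    (PySem.List.slice lines (some 1) none).foldl (fun r line => r ++ "\n" ++ prefix_ ++ line) result

-- ===== PORT B =====
def format_multiline_alt (text : String) (prefix_ : String) : String :=
  PySem.Str.replace text "\n" ("\n" ++ prefix_)

-- ===== PRECONDITION & SPEC =====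
def Spec_format_multiline (text : String) (prefix_ : String) (out : String) : Prop := out = format_multiline_alt text prefix_
instance (text : String) (prefix_ : String) (out : String) : Decidable (Spec_format_multiline text prefix_ out) := by unfold Spec_format_multiline; infer_instance

-- ===== CLAIM (what is proved, stated in full; the proofs are below) =====
def Claim_equal_format_multiline : Prop := ∀ (text : String) (prefix_ : String), Dom_format_multiline text prefix_ → Spec_format_multiline text prefix_ (format_multiline text prefix_)

-- ===== LEMMAS AND PROOFS =====

-- spec split on a single-character separator
def sp1 (s : Char) : List Char → List (List Char)
  | [] => [[]]
  | c :: cs =>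
    if c = s then [] :: sp1 s cs
    else
      match sp1 s cs with
      | [] => [[c]]
      | l :: ls => (c :: l) :: ls

-- spec replace of a single character by a word
def rp1 (s : Char) (new : List Char) : List Char → List Char
  | [] => []
  | c :: cs => (if c = s then new else [c]) ++ rp1 s new cs

theorem sp1_ne_nil (s : Char) (cs : List Char) : sp1 s cs ≠ [] := by
  induction cs with
  | nil => simp [sp1]
  | cons c cs ih =>
    simp only [sp1]
    split_ifs with h
    · simp
    · cases hsp : sp1 s cs <;> simp

theorem splitOn_go_cons (s : Char) (fuel : Nat) (c : Char) (rest cur : List Char)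
    (acc : List (List Char)) :
    PySem.Chars.splitOn.go [s] (fuel + 1) (c :: rest) cur acc =
      if c = s then PySem.Chars.splitOn.go [s] fuel rest [] (cur.reverse :: acc)
      else PySem.Chars.splitOn.go [s] fuel rest (c :: cur) acc := by
  rw [PySem.Chars.splitOn.go]
  simp only [List.isPrefixOf, Bool.and_true, List.length_cons, List.length_nil, List.drop]
  rcases eq_or_ne c s with h | h
  · simp [h]
  · simp [h, Ne.symm h, beq_iff_eq]

theorem splitOn_go_nil (s : Char) (fuel : Nat) (cur : List Char) (acc : List (List Char)) :
    PySem.Chars.splitOn.go [s] (fuel + 1) [] cur acc = acc.reverse ++ [cur.reverse] := by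
  rw [PySem.Chars.splitOn.go] <;> simp

theorem splitOn_go_eq_sp1 (s : Char) (fuel : Nat) :
    ∀ (cs cur : List Char) (acc : List (List Char)), cs.length < fuel →
      PySem.Chars.splitOn.go [s] fuel cs cur acc =
        acc.reverse ++
          (match sp1 s cs with
           | [] => []
           | l :: ls => (cur.reverse ++ l) :: ls) := by
  induction fuel with
  | zero => intro cs cur acc h; omega
  | succ fuel ih =>
    intro cs cur acc h
    cases cs with
    | nil => simp [splitOn_go_nil, sp1]
    | cons c rest =>
      rw [splitOn_go_cons]
      rcases eq_or_ne c s with hc | hc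
      · rw [if_pos hc, ih rest [] (cur.reverse :: acc) (by simpa using Nat.lt_of_succ_lt_succ h)]
        simp only [sp1, if_pos hc]
        cases hsp : sp1 s rest with
        | nil => exact absurd hsp (sp1_ne_nil s rest)
        | cons l ls => simp
      · rw [if_neg hc, ih rest (c :: cur) acc (by simpa using Nat.lt_of_succ_lt_succ h)]
        simp only [sp1, if_neg hc]
        cases hsp : sp1 s rest with
        | nil => exact absurd hsp (sp1_ne_nil s rest)
        | cons l ls => simp

theorem splitOn_eq_sp1 (s : Char) (cs : List Char) :
    PySem.Chars.splitOn cs [s] = sp1 s cs := by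
  rw [PySem.Chars.splitOn, splitOn_go_eq_sp1 s (cs.length + 1) cs [] [] (by omega)]
  cases hsp : sp1 s cs with
  | nil => exact absurd hsp (sp1_ne_nil s cs)
  | cons l ls => simp

theorem replace_go_cons (s : Char) (new : List Char) (fuel : Nat) (c : Char)
    (rest acc : List Char) :
    PySem.Chars.replace.go [s] new (fuel + 1) (c :: rest) acc =
      if c = s then PySem.Chars.replace.go [s] new fuel rest (new.reverse ++ acc)
      else PySem.Chars.replace.go [s] new fuel rest (c :: acc) := by
  rw [PySem.Chars.replace.go]
  simp only [List.isPrefixOf, Bool.and_true, List.length_cons, List.length_nil, List.drop]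
  rcases eq_or_ne c s with h | h
  · simp [h]
  · simp [h, Ne.symm h, beq_iff_eq]

theorem replace_go_eq_rp1 (s : Char) (new : List Char) (fuel : Nat) :
    ∀ (cs acc : List Char), cs.length ≤ fuel →
      PySem.Chars.replace.go [s] new fuel cs acc = acc.reverse ++ rp1 s new cs := by
  induction fuel with
  | zero =>
    intro cs acc h
    have : cs = [] := List.eq_nil_of_length_eq_zero (Nat.le_zero.mp h)
    subst this
    rw [PySem.Chars.replace.go] <;> simp [rp1]
  | succ fuel ih =>
    intro cs acc h
    cases cs with
    | nil => rw [PySem.Chars.replace.go] <;> simp [rp1]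
    | cons c rest =>
      rw [replace_go_cons]
      rcases eq_or_ne c s with hc | hc
      · rw [if_pos hc, ih rest (new.reverse ++ acc) (by simpa using Nat.le_of_succ_le_succ h)]
        simp [rp1, hc]
      · rw [if_neg hc, ih rest (c :: acc) (by simpa using Nat.le_of_succ_le_succ h)]
        simp [rp1, hc]

theorem replace_eq_rp1 (s : Char) (new : List Char) (cs : List Char) :
    PySem.Chars.replace cs [s] new = rp1 s new cs := by
  rw [PySem.Chars.replace]
  simp only [List.isEmpty_cons, if_neg Bool.false_ne_true]
  exact replace_go_eq_rp1 s new cs.length cs [] le_rfl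

theorem sp1_length_one_iff (s : Char) (cs : List Char) :
    (sp1 s cs).length = 1 ↔ s ∉ cs := by
  induction cs with
  | nil => simp [sp1]
  | cons c rest ih =>
    simp only [sp1]
    rcases eq_or_ne c s with hc | hc
    · rw [if_pos hc]
      have hne := sp1_ne_nil s rest
      constructor
      · intro h; exfalso
        simp only [List.length_cons] at h
        exact hne (List.eq_nil_of_length_eq_zero (by omega))
      · intro h; exact absurd (by simp [← hc] : s ∈ c :: rest) h
    · cases hsp : sp1 s rest with
      | nil => exact absurd hsp (sp1_ne_nil s rest)
      | cons l ls =>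
        rw [if_neg hc]
        simp only [List.length_cons, List.mem_cons]
        rw [hsp] at ih
        simp only [List.length_cons] at ih
        constructor
        · intro h hm
          rcases hm with hm | hm
          · exact hc hm.symm
          · exact (ih.mp h) hm
        · intro h
          exact ih.mpr (fun hm => h (Or.inr hm))

theorem rp1_of_not_mem (s : Char) (new : List Char) (cs : List Char) (h : s ∉ cs) :
    rp1 s new cs = cs := by
  induction cs with
  | nil => simp [rp1]
  | cons c rest ih =>
    simp only [List.mem_cons, not_or] at h
    simp [rp1, Ne.symm h.1, ih h.2]

-- folding the tail pieces with '\n'+prefix equals rp1 on the original chars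
theorem fold_sp1 (s : Char) (p : List Char) :
    ∀ (cs acc l : List Char) (ls : List (List Char)), sp1 s cs = l :: ls →
      ls.foldl (fun r l => r ++ s :: (p ++ l)) (acc ++ l) = acc ++ rp1 s (s :: p) cs := by
  intro cs
  induction cs with
  | nil =>
    intro acc l ls h
    simp only [sp1] at h
    cases h
    simp [rp1]
  | cons c rest ih =>
    intro acc l ls h
    simp only [sp1] at h
    rcases eq_or_ne c s with hc | hc
    · rw [if_pos hc] at h
      cases h
      cases hsp : sp1 s rest with
      | nil => exact absurd hsp (sp1_ne_nil s rest)
      | cons l' ls' =>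
        simp only [List.append_nil, List.foldl_cons]
        rw [show acc ++ s :: (p ++ l') = (acc ++ s :: p) ++ l' by simp]
        rw [ih (acc ++ s :: p) l' ls' hsp]
        simp [rp1, hc]
    · rw [if_neg hc] at h
      cases hsp : sp1 s rest with
      | nil => exact absurd hsp (sp1_ne_nil s rest)
      | cons l' ls' =>
        rw [hsp] at h
        injection h with h1 h2
        subst h1
        subst h2
        rw [show acc ++ (c :: l') = (acc ++ [c]) ++ l' by simp]
        rw [ih (acc ++ [c]) l' _ hsp]
        simp [rp1, hc]

-- folding over the String pieces is the String.ofList image of the Chars fold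
theorem fold_map_ofList (prefix_ : String) (ls : List (List Char)) :
    ∀ l0 : List Char,
      (List.map String.ofList ls).foldl (fun r line => r ++ "\n" ++ prefix_ ++ line)
          (String.ofList l0) =
        String.ofList (ls.foldl (fun r l => r ++ '\n' :: (prefix_.toList ++ l)) l0) := by
  induction ls with
  | nil => intro l0; simp
  | cons l ls ih =>
    intro l0
    simp only [List.map_cons, List.foldl_cons]
    rw [show (String.ofList l0) ++ "\n" ++ prefix_ ++ (String.ofList l)
          = String.ofList (l0 ++ '\n' :: (prefix_.toList ++ l)) by
        rw [← String.toList_inj]; simp]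
    exact ih _

-- ===== VERDICT (by name: the statement is the Claim_ definition above) =====
theorem format_multiline_spec : Claim_equal_format_multiline := by
  intro text prefix_ _
  unfold Spec_format_multiline format_multiline format_multiline_alt
  have hsplit : PySem.Str.split? text "\n" =
      some (List.map String.ofList (sp1 '\n' text.toList)) := by
    rw [PySem.Str.split?, PySem.Chars.split?]
    simp [splitOn_eq_sp1]
  rw [hsplit]
  have halt : PySem.Str.replace text "\n" ("\n" ++ prefix_) =
      String.ofList (rp1 '\n' ('\n' :: prefix_.toList) text.toList) := by
    rw [← String.toList_inj, PySem.Str.toList_replace]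
    have h1 : ("\n" ++ prefix_).toList = '\n' :: prefix_.toList := by simp
    have h2 : ("\n" : String).toList = ['\n'] := by decide
    rw [h1, h2, replace_eq_rp1]
    simp
  simp only [Option.getD_some]
  by_cases hlen : (List.map String.ofList (sp1 '\n' text.toList)).length = 1
  · rw [if_pos hlen, halt]
    rw [List.length_map] at hlen
    rw [rp1_of_not_mem _ _ _ ((sp1_length_one_iff '\n' text.toList).mp hlen)]
    rw [← String.toList_inj]
    simp
  · rw [if_neg hlen, halt]
    rw [PySem.List.slice_from _ (by norm_num : (0:Int) ≤ 1)]
    cases hsp : sp1 '\n' text.toList with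
    | nil => exact absurd hsp (sp1_ne_nil '\n' text.toList)
    | cons l ls =>
      simp only [List.map_cons, List.headD_cons, Int.toNat_one, List.drop_one,
        List.tail_cons]
      rw [fold_map_ofList]
      have := fold_sp1 '\n' prefix_.toList text.toList [] l ls hsp
      simp only [List.nil_append] at this
      rw [this]
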